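-- pv_equiv track=rewrite | github.com/itstherealjasper/CSE3000 | src/performance-testing-cluster/pumpkin-solver/pumpkin-solver/Python/pumpkin_experiments.py | AreSolverTrajectoriesSame
-- ===== SOURCE A (Python) =====
-- def AreSolverTrajectoriesSame(trajectory1, trajectory2):
--     for i in range(min(len(trajectory1), len(trajectory2))):
--         if trajectory1[i]['objective'] != trajectory2[i]['objective']:
--             return False
--         elif trajectory1[i]['restart-counter'] != trajectory2[i]['restart-counter']:
--             return False
--         elif trajectory1[i]['num-conflicts-until-restart'] != trajectory2[i]['num-conflicts-until-restart']:
--             return False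
--     return True
-- ===== SOURCE B (Python) =====
-- def AreSolverTrajectoriesSame(trajectory1, trajectory2):
--     if not trajectory1 or not trajectory2:
--         return True
--     first1, first2 = trajectory1[0], trajectory2[0]
--     return (first1['objective'] == first2['objective']
--             and first1['restart-counter'] == first2['restart-counter']
--             and first1['num-conflicts-until-restart'] == first2['num-conflicts-until-restart']
--             and AreSolverTrajectoriesSame(trajectory1[1:], trajectory2[1:]))
-- ===== Notes on version B (the rewrite author's own statement) =====
-- stated objective: alternative
-- what changed: B replaces A's index-driven loop over range(min(len,len)) with early returns by structural recursion on the two lists: compare the heads' three fields with one short-circuiting conjunction and recurse on the tails.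
import Mathlib
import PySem

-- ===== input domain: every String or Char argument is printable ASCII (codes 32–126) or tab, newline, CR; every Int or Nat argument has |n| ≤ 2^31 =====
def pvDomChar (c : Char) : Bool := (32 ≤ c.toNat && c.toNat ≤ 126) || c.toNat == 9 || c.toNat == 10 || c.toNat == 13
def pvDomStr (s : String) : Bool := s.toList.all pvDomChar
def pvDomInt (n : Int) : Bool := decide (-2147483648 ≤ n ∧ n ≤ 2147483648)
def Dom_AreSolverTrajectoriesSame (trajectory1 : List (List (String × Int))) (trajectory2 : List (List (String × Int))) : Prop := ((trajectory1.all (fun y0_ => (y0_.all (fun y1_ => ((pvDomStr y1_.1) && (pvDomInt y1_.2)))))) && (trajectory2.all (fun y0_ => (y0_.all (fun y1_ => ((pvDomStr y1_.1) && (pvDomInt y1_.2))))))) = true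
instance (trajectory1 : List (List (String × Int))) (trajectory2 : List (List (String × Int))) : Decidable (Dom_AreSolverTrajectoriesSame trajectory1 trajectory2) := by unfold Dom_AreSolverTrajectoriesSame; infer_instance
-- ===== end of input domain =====

-- B replaces A's index-driven loop over range(min(len,len)) with early returns by structural
-- recursion on the two lists: compare the heads' three fields with one short-circuiting
-- conjunction and recurse on the tails (objective: alternative). Both Pythons raise KeyError on
-- the same inputs (a reached missing key); Pre_ excludes exactly those, and both ports read a
-- missing key as the same default 0, which Pre_ keeps out of the compared values.

-- ===== PORT A =====
-- d[k]; on inputs satisfying Pre_, every key this reads is present, so the 0 default of the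
-- KeyError case (get? = none) is never the compared value.
def pvLookupA (d : List (String × Int)) (k : String) : Int := (PySem.Dict.get? (PySem.Dict.mk d) k).getD 0

-- the for-loop of A over the index list, with the early returns as the if-chain
def pvLoopA (t1 t2 : List (List (String × Int))) : List Nat → Bool
  | [] => true
  | i :: rest =>
    if pvLookupA (t1.getD i []) "objective" ≠ pvLookupA (t2.getD i []) "objective" then false
    else if pvLookupA (t1.getD i []) "restart-counter" ≠ pvLookupA (t2.getD i []) "restart-counter" then false
    else if pvLookupA (t1.getD i []) "num-conflicts-until-restart" ≠ pvLookupA (t2.getD i []) "num-conflicts-until-restart" then false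
    else pvLoopA t1 t2 rest

def AreSolverTrajectoriesSame (trajectory1 : List (List (String × Int))) (trajectory2 : List (List (String × Int))) : Bool :=
  pvLoopA trajectory1 trajectory2 (List.range (min trajectory1.length trajectory2.length))

-- ===== PORT B =====
-- Source B's structural recursion: empty base case, then the short-circuiting 'and' chain over the
-- heads' three fields (first['k'] is the same d[k] read as in port A) and the recursive call on
-- the tails.
def AreSolverTrajectoriesSame_alt (trajectory1 : List (List (String × Int))) (trajectory2 : List (List (String × Int))) : Bool :=
  match trajectory1, trajectory2 with
  | [], _ => true
  | _ :: _, [] => true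
  | first1 :: rest1, first2 :: rest2 =>
    (pvLookupA first1 "objective" == pvLookupA first2 "objective") &&
    ((pvLookupA first1 "restart-counter" == pvLookupA first2 "restart-counter") &&
     ((pvLookupA first1 "num-conflicts-until-restart" == pvLookupA first2 "num-conflicts-until-restart") &&
      AreSolverTrajectoriesSame_alt rest1 rest2))

-- ===== PRECONDITION & SPEC =====
-- Pre_ is exactly the inputs on which Python A (and Python B) returns, i.e. no KeyError: element i
-- is only reached while all earlier pairs are fully keyed and field-equal, and within element i a
-- later key is only read while the earlier fields are present and equal.
def pvHasK (t : List (String × Int)) (k : String) : Bool := (PySem.Dict.get? (PySem.Dict.mk t) k).isSome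

-- the pair (a, b) would make the scan raise when reached
def pvStepRaises (a b : List (String × Int)) : Bool :=
  !(pvHasK a "objective" && pvHasK b "objective") ||
  (pvLookupA a "objective" == pvLookupA b "objective" && !(pvHasK a "restart-counter" && pvHasK b "restart-counter")) ||
  (pvLookupA a "objective" == pvLookupA b "objective" && pvLookupA a "restart-counter" == pvLookupA b "restart-counter" &&
    !(pvHasK a "num-conflicts-until-restart" && pvHasK b "num-conflicts-until-restart"))

-- the pair (a, b) is fully keyed and field-equal, so the scan moves past it
def pvStepPasses (a b : List (String × Int)) : Bool :=
  (pvHasK a "objective" && pvHasK b "objective" && pvLookupA a "objective" == pvLookupA b "objective") &&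
  (pvHasK a "restart-counter" && pvHasK b "restart-counter" && pvLookupA a "restart-counter" == pvLookupA b "restart-counter") &&
  (pvHasK a "num-conflicts-until-restart" && pvHasK b "num-conflicts-until-restart" &&
    pvLookupA a "num-conflicts-until-restart" == pvLookupA b "num-conflicts-until-restart")

def Pre_AreSolverTrajectoriesSame (trajectory1 : List (List (String × Int))) (trajectory2 : List (List (String × Int))) : Prop :=
  ∀ i < min trajectory1.length trajectory2.length,
    (∀ j < i, pvStepPasses (trajectory1.getD j []) (trajectory2.getD j []) = true) →
    pvStepRaises (trajectory1.getD i []) (trajectory2.getD i []) = false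

instance (trajectory1 : List (List (String × Int))) (trajectory2 : List (List (String × Int))) : Decidable (Pre_AreSolverTrajectoriesSame trajectory1 trajectory2) := by
  unfold Pre_AreSolverTrajectoriesSame; infer_instance

def pvWitness_AreSolverTrajectoriesSame : (List (List (String × Int))) × (List (List (String × Int))) :=
  ([[("objective", 3), ("restart-counter", 1), ("num-conflicts-until-restart", 7)]],
   [[("objective", 3), ("restart-counter", 1), ("num-conflicts-until-restart", 7)]])

def Spec_AreSolverTrajectoriesSame (trajectory1 : List (List (String × Int))) (trajectory2 : List (List (String × Int))) (out : Bool) : Prop := out = AreSolverTrajectoriesSame_alt trajectory1 trajectory2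
instance (trajectory1 : List (List (String × Int))) (trajectory2 : List (List (String × Int))) (out : Bool) : Decidable (Spec_AreSolverTrajectoriesSame trajectory1 trajectory2 out) := by unfold Spec_AreSolverTrajectoriesSame; infer_instance

-- ===== CLAIM (what is proved, stated in full; the proofs are below) =====
def Claim_equal_AreSolverTrajectoriesSame : Prop := ∀ (trajectory1 : List (List (String × Int))) (trajectory2 : List (List (String × Int))), Dom_AreSolverTrajectoriesSame trajectory1 trajectory2 → Pre_AreSolverTrajectoriesSame trajectory1 trajectory2 → Spec_AreSolverTrajectoriesSame trajectory1 trajectory2 (AreSolverTrajectoriesSame trajectory1 trajectory2)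

-- ===== LEMMAS AND PROOFS =====

-- A's loop shifts over a cons pair
theorem pvLoopA_shift (a b : List (String × Int)) (t1 t2 : List (List (String × Int)))
    (l : List Nat) :
    pvLoopA (a :: t1) (b :: t2) (l.map Nat.succ) = pvLoopA t1 t2 l := by
  induction l with
  | nil => rfl
  | cons i rest ihr => simp only [List.map_cons, pvLoopA, List.getD_cons_succ, ihr]

-- the two ports agree on all inputs (the 0-default read of a missing key is the same on both
-- sides, so no hypothesis is needed; the Pre_ of the claim places the Pythons' KeyError inputs)
theorem pvMain (t1 t2 : List (List (String × Int))) :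
    pvLoopA t1 t2 (List.range (min t1.length t2.length)) =
      AreSolverTrajectoriesSame_alt t1 t2 := by
  induction t1 generalizing t2 with
  | nil => simp [pvLoopA, AreSolverTrajectoriesSame_alt]
  | cons a t1 ih =>
    cases t2 with
    | nil => simp [pvLoopA, AreSolverTrajectoriesSame_alt]
    | cons b t2 =>
      rw [List.length_cons, List.length_cons, Nat.succ_min_succ, List.range_succ_eq_map]
      rw [pvLoopA, pvLoopA_shift]
      simp only [List.getD_cons_zero, AreSolverTrajectoriesSame_alt]
      by_cases e1 : pvLookupA a "objective" = pvLookupA b "objective" <;>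
      by_cases e2 : pvLookupA a "restart-counter" = pvLookupA b "restart-counter" <;>
      by_cases e3 : pvLookupA a "num-conflicts-until-restart" = pvLookupA b "num-conflicts-until-restart" <;>
      simp [e1, e2, e3, ih]

-- ===== VERDICT (by name: the statement is the Claim_ definition above) =====
theorem AreSolverTrajectoriesSame_spec : Claim_equal_AreSolverTrajectoriesSame := by
  intro trajectory1 trajectory2 _ _
  exact pvMain trajectory1 trajectory2
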